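-- pv_equiv track=rewrite | github.com/k33ngTomide/python_works | Assignments/Geopolitical_zones.py | get_zone
-- ===== SOURCE A (Python) =====
-- def get_zone(state, given_dict) -> str:
--     found_zone = "No zone"
--     for politicalZone, state_list in given_dict.items():
--         for new_state in state_list:
--             if state == new_state:
--                 found_zone = politicalZone
--                 break
--
--     return found_zone
-- ===== SOURCE B (Python) =====
-- def get_zone(state, given_dict) -> str:
--     reverse = {s: z for z, states in given_dict.items() for s in states}
--     return reverse.get(state, "No zone")
-- ===== Notes on version B (the rewrite author's own statement) =====
-- stated objective: idiomatic
-- what changed: Replaces the nested scan-and-compare loops with a reverse state-to-zone dict built in one comprehension (later zones overwrite, matching A's last-match-wins) followed by a single hashed lookup with a default.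
import Mathlib
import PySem

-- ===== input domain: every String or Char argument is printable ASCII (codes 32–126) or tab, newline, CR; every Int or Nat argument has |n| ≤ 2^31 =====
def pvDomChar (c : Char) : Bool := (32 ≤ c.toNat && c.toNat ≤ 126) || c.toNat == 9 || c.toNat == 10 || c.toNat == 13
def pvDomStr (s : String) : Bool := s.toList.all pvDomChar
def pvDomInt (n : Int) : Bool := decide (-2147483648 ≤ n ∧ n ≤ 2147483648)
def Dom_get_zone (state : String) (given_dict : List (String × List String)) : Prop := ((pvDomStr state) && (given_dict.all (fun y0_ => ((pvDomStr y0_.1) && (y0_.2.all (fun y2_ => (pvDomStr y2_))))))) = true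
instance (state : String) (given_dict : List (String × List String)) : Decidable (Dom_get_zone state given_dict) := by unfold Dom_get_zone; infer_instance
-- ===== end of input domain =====

-- B replaces A's nested scan with a reverse state→zone dict built once, then a single lookup (idiomatic).

-- ===== PORT A =====
-- inner 'for new_state in state_list: if state == new_state: found_zone = politicalZone; break'
def pvInnerA (state z acc : String) (state_list : List String) : String :=
  match state_list with
  | [] => acc
  | s :: rest => if state == s then z else pvInnerA state z acc rest

def get_zone (state : String) (given_dict : List (String × List String)) : String :=
  given_dict.foldl (fun found_zone p => pvInnerA state p.1 found_zone p.2) "No zone"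

-- ===== PORT B =====
def get_zone_alt (state : String) (given_dict : List (String × List String)) : String :=
  let reverse : PySem.Dict String String :=
    given_dict.foldl (fun d p => p.2.foldl (fun d s => d.insert s p.1) d) PySem.Dict.empty
  reverse.getD state "No zone"

-- ===== PRECONDITION & SPEC =====
def Spec_get_zone (state : String) (given_dict : List (String × List String)) (out : String) : Prop := out = get_zone_alt state given_dict
instance (state : String) (given_dict : List (String × List String)) (out : String) : Decidable (Spec_get_zone state given_dict out) := by unfold Spec_get_zone; infer_instance

-- ===== CLAIM (what is proved, stated in full; the proofs are below) =====
def Claim_equal_get_zone : Prop := ∀ (state : String) (given_dict : List (String × List String)), Dom_get_zone state given_dict → Spec_get_zone state given_dict (get_zone state given_dict)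

-- ===== LEMMAS AND PROOFS =====

theorem pvInnerA_eq_if (state z acc : String) (sl : List String) :
    pvInnerA state z acc sl = if state ∈ sl then z else acc := by
  induction sl with
  | nil => simp [pvInnerA]
  | cons s rest ih =>
      simp only [pvInnerA, ih, List.mem_cons, beq_iff_eq]
      by_cases h : state = s <;> simp [h]

theorem getD_foldl_insert_const (state z d0 : String) (d : PySem.Dict String String) (sl : List String) :
    (sl.foldl (fun d s => d.insert s z) d).getD state d0
      = if state ∈ sl then z else d.getD state d0 := by
  induction sl generalizing d with
  | nil => simp
  | cons s rest ih =>
      simp only [List.foldl_cons, ih, List.mem_cons]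
      by_cases hr : state ∈ rest
      · simp [hr]
      · by_cases hs : state = s <;>
          simp [hr, hs, PySem.Dict.getD_insert]

theorem outer_invariant (state : String) (l : List (String × List String))
    (d : PySem.Dict String String) (acc : String)
    (h : d.getD state "No zone" = acc) :
    (l.foldl (fun d p => p.2.foldl (fun d s => d.insert s p.1) d) d).getD state "No zone"
      = l.foldl (fun found_zone p => pvInnerA state p.1 found_zone p.2) acc := by
  induction l generalizing d acc with
  | nil => simpa using h
  | cons p rest ih =>
      simp only [List.foldl_cons]
      apply ih
      rw [getD_foldl_insert_const, pvInnerA_eq_if, h]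

-- ===== VERDICT (by name: the statement is the Claim_ definition above) =====
theorem get_zone_spec : Claim_equal_get_zone := by
  intro state given_dict _
  unfold Spec_get_zone get_zone get_zone_alt
  exact (outer_invariant state given_dict PySem.Dict.empty "No zone" (by simp)).symm
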